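-- pv_equiv track=rewrite | github.com/georgehgfonseca/dsa-python | .history/kickstart/2022/roundC/newPassword_20220819120633.py | change_pass
-- ===== SOURCE A (Python) =====
-- def change_pass(password):
--     sp_char = False
--     digit = False
--     upper = False
--     lower = False
--     for letter in password:
--         if letter == "#" or letter == "@" or letter == "*" or letter == "&":
--             sp_char = True
--         if letter.isdigit():
--             digit = True
--         if letter.isupper():
--             upper = True
--         if letter.islower():
--             lower = True
--         if len(password) >= 7 and sp_char and digit and upper and lower:
--             return password
--     if not sp_char:
--         password += "#"
--     if not digit:
--         password += "0"
--     if not upper: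
--         password += "A"
--     if not lower:
--         password += "a"
--     while len(password) < 7:
--         password += "a"
--     return password
-- ===== SOURCE B (Python) =====
-- def change_pass(password):
--     has_special = any(c in "#@*&" for c in password)
--     has_digit = any(c.isdigit() for c in password)
--     has_upper = any(c.isupper() for c in password)
--     has_lower = any(c.islower() for c in password)
--     if not has_special:
--         password += "#"
--     if not has_digit:
--         password += "0"
--     if not has_upper:
--         password += "A"
--     if not has_lower:
--         password += "a"
--     if len(password) < 7:
--         password += "a" * (7 - len(password))
--     return password
-- ===== Notes on version B (the rewrite author's own statement) =====
-- stated objective: idiomatic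
-- what changed: Replaces the single stateful loop with an in-body early return by four independent any() scans plus one-shot arithmetic padding (string repetition up to length 7) instead of a character-by-character while loop; the early return is dropped because the tail is a no-op exactly when it fired.
import Mathlib
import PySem

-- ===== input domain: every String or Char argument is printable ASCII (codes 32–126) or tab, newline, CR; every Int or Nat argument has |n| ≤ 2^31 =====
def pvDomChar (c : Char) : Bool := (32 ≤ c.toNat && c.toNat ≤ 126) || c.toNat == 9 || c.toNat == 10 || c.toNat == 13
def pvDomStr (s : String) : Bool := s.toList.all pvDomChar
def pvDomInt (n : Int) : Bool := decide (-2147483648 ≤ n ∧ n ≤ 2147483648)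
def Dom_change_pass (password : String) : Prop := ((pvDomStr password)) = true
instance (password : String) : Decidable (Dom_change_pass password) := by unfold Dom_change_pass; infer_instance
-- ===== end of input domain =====

-- B replaces A's single stateful loop (with its early return) by four independent any-scans
-- and arithmetic padding; objective: more idiomatic. Same return value everywhere.

-- ===== PORT A =====
def pvSpChar (c : Char) : Bool := c == '#' || c == '@' || c == '*' || c == '&'

-- `while len(password) < 7: password += "a"`
def pvPadA (pw : List Char) : List Char :=
  if pw.length < 7 then pvPadA (pw ++ ['a']) else pw
termination_by 7 - pw.length

-- the four trailing `if not flag` appends followed by the while loop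
def pvTailA (pw : List Char) (s d u l : Bool) : List Char :=
  let pw := if !s then pw ++ ['#'] else pw
  let pw := if !d then pw ++ ['0'] else pw
  let pw := if !u then pw ++ ['A'] else pw
  let pw := if !l then pw ++ ['a'] else pw
  pvPadA pw

-- the for-loop with its early return
def pvLoopA (pw : List Char) : List Char → Bool → Bool → Bool → Bool → List Char
  | [], s, d, u, l => pvTailA pw s d u l
  | c :: rest, s, d, u, l =>
    let s := s || pvSpChar c
    let d := d || PySem.Chars.isdigit c
    let u := u || PySem.Chars.isupper c
    let l := l || PySem.Chars.islower c
    if decide (7 ≤ pw.length) && s && d && u && l then pw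
    else pvLoopA pw rest s d u l

def change_pass (password : String) : String :=
  String.ofList (pvLoopA password.toList password.toList false false false false)

-- ===== PORT B =====
def change_pass_alt (password : String) : String :=
  let cs := password.toList
  let hasSpecial := cs.any (fun c => ['#', '@', '*', '&'].contains c)
  let hasDigit := cs.any PySem.Chars.isdigit
  let hasUpper := cs.any PySem.Chars.isupper
  let hasLower := cs.any PySem.Chars.islower
  let cs := if !hasSpecial then cs ++ ['#'] else cs
  let cs := if !hasDigit then cs ++ ['0'] else cs
  let cs := if !hasUpper then cs ++ ['A'] else cs
  let cs := if !hasLower then cs ++ ['a'] else cs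
  let cs := if cs.length < 7 then cs ++ List.replicate (7 - cs.length) 'a' else cs
  String.ofList cs

-- ===== PRECONDITION & SPEC =====
def Spec_change_pass (password : String) (out : String) : Prop := out = change_pass_alt password
instance (password : String) (out : String) : Decidable (Spec_change_pass password out) := by unfold Spec_change_pass; infer_instance

-- ===== CLAIM (what is proved, stated in full; the proofs are below) =====
def Claim_equal_change_pass : Prop := ∀ (password : String), Dom_change_pass password → Spec_change_pass password (change_pass password)

-- ===== LEMMAS AND PROOFS =====

lemma pvPadA_of_ge (pw : List Char) (h : ¬ pw.length < 7) : pvPadA pw = pw := by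
  unfold pvPadA; simp [h]

lemma pvPadA_eq (pw : List Char) :
    pvPadA pw = if pw.length < 7 then pw ++ List.replicate (7 - pw.length) 'a' else pw := by
  fun_induction pvPadA pw with
  | case1 pw h ih =>
    rw [ih]
    simp only [List.length_append, List.length_singleton, if_pos h]
    by_cases h2 : pw.length + 1 < 7
    · simp only [if_pos h2, List.append_assoc, List.singleton_append]
      congr 1
      have : 7 - pw.length = (7 - (pw.length + 1)) + 1 := by omega
      rw [this, List.replicate_succ]
    · have : pw.length = 6 := by omega
      simp [this, List.replicate_succ]
  | case2 pw h => simp [if_neg h]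

lemma pvTailA_all_true (pw : List Char) (h : 7 ≤ pw.length) :
    pvTailA pw true true true true = pw := by
  unfold pvTailA
  simp only [Bool.not_true, Bool.false_eq_true, if_false]
  exact pvPadA_of_ge pw (by omega)

lemma pvLoopA_eq (pw : List Char) (cs : List Char) (s d u l : Bool) :
    pvLoopA pw cs s d u l =
      if decide (7 ≤ pw.length) && (s || cs.any pvSpChar) && (d || cs.any PySem.Chars.isdigit)
          && (u || cs.any PySem.Chars.isupper) && (l || cs.any PySem.Chars.islower) then pw
      else pvTailA pw (s || cs.any pvSpChar) (d || cs.any PySem.Chars.isdigit)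
        (u || cs.any PySem.Chars.isupper) (l || cs.any PySem.Chars.islower) := by
  induction cs generalizing s d u l with
  | nil =>
    rw [show pvLoopA pw [] s d u l = pvTailA pw s d u l from rfl]
    simp only [List.any_nil, Bool.or_false]
    by_cases h : (decide (7 ≤ pw.length) && s && d && u && l) = true
    · rw [if_pos h]
      simp only [Bool.and_eq_true, decide_eq_true_eq] at h
      obtain ⟨⟨⟨⟨h7, hs⟩, hd⟩, hu⟩, hl⟩ := h
      subst hs hd hu hl
      exact pvTailA_all_true pw h7
    · rw [if_neg h]
  | cons c rest ih =>
    simp only [pvLoopA, List.any_cons]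
    by_cases h : (decide (7 ≤ pw.length) && (s || pvSpChar c) && (d || PySem.Chars.isdigit c)
        && (u || PySem.Chars.isupper c) && (l || PySem.Chars.islower c)) = true
    · rw [if_pos h]
      simp only [Bool.and_eq_true, Bool.or_eq_true, decide_eq_true_eq] at h
      rw [if_pos]
      simp only [Bool.and_eq_true, Bool.or_eq_true, decide_eq_true_eq]
      tauto
    · rw [if_neg h, ih]
      simp only [Bool.or_assoc]

lemma contains_eq_pvSpChar (c : Char) :
    (['#', '@', '*', '&'].contains c) = pvSpChar c := by
  simp [pvSpChar, Bool.or_assoc, beq_eq_decide]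

-- ===== VERDICT (by name: the statement is the Claim_ definition above) =====
theorem change_pass_spec : Claim_equal_change_pass := by
  intro password _
  show change_pass password = change_pass_alt password
  unfold change_pass change_pass_alt
  have hfun : (fun c => (['#', '@', '*', '&'].contains c)) = pvSpChar :=
    funext contains_eq_pvSpChar
  rw [hfun, pvLoopA_eq]
  simp only [Bool.false_or]
  congr 1
  by_cases h : (decide (7 ≤ password.toList.length)
      && password.toList.any pvSpChar && password.toList.any PySem.Chars.isdigit
      && password.toList.any PySem.Chars.isupper && password.toList.any PySem.Chars.islower) = true
  · rw [if_pos h]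
    simp only [Bool.and_eq_true, decide_eq_true_eq] at h
    obtain ⟨⟨⟨⟨h7, hs⟩, hd⟩, hu⟩, hl⟩ := h
    simp only [hs, hd, hu, hl, Bool.not_true, Bool.false_eq_true, if_false]
    rw [if_neg (by omega)]
  · rw [if_neg h]
    unfold pvTailA
    rw [pvPadA_eq]
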